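-- pv_equiv track=rewrite | github.com/Brick-Briceno/SBR | compiler.py | insert_multiplication_operators
-- ===== SOURCE A (Python) =====
-- def insert_multiplication_operators(expression):
--     result = ""
--     for i, char in enumerate(expression):
--         if char == "(" and i > 0 and expression[i-1].isdigit():
--             result += f"*{char}"
--         elif char == ")" and i < len(expression) - 1 and expression[i+1].isdigit():
--             result += f"{char}*"
--         else:
--             result += char
--     return result
-- ===== SOURCE B (Python) =====
-- def _insert_between(chars, boundary):
--     # one sweep: emit each char, adding '*' at every adjacent pair satisfying `boundary`
--     out = []
--     for a, b in zip(chars, chars[1:]):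
--         out.append(a)
--         if boundary(a, b):
--             out.append("*")
--     out.extend(chars[-1:])
--     return out
--
--
-- def insert_multiplication_operators(expression):
--     s = list(expression)
--     s = _insert_between(s, lambda a, b: a.isdigit() and b == "(")
--     s = _insert_between(s, lambda a, b: a == ")" and b.isdigit())
--     return "".join(s)
-- ===== Notes on version B (the rewrite author's own statement) =====
-- stated objective: alternative
-- what changed: Replaced the single index-walking loop with guarded expression[i-1]/expression[i+1] lookups by two independent pairwise sweeps over zip(s, s[1:]), one inserting '*' at digit-'(' boundaries and one at ')'-digit boundaries.
import Mathlib
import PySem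

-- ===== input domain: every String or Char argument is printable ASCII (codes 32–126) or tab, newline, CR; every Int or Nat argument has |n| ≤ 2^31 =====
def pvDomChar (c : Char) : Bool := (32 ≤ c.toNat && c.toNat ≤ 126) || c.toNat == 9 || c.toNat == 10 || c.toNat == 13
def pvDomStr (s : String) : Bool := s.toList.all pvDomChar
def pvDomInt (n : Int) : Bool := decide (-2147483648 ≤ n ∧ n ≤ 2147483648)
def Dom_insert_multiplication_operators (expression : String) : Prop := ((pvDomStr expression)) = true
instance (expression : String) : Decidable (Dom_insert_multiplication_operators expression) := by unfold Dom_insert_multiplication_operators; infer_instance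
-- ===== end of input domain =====

-- B replaces A's single index-walking loop (neighbor lookups by index) with two independent
-- pairwise boundary-insertion sweeps; alternative decomposition, same O(n) cost.


-- ===== PORT A =====
-- loop body of A; expression[i-1] / expression[i+1] are guarded by i > 0 / i < len-1,
-- so pyGetD with a default is exact there
def stepA (cs : List Char) (result : List Char) (ic : Int × Char) : List Char :=
  if ic.2 = '(' ∧ ic.1 > 0 ∧ PySem.Chars.isdigit (PySem.List.pyGetD cs (ic.1 - 1) ' ') then
    result ++ ['*', ic.2]
  else if ic.2 = ')' ∧ ic.1 < (cs.length : Int) - 1 ∧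
      PySem.Chars.isdigit (PySem.List.pyGetD cs (ic.1 + 1) ' ') then
    result ++ [ic.2, '*']
  else
    result ++ [ic.2]

def insert_multiplication_operators (expression : String) : String :=
  let cs := expression.toList
  String.ofList ((PySem.List.enumerate cs 0).foldl (stepA cs) [])

-- ===== PORT B =====
-- port of Source B's _insert_between: sweep over adjacent pairs, insert '*' at boundaries
def insertBetween (boundary : Char → Char → Bool) : List Char → List Char
  | [] => []
  | [a] => [a]
  | a :: b :: rest =>
    (if boundary a b then [a, '*'] else [a]) ++ insertBetween boundary (b :: rest)

def bBoundary1 (a b : Char) : Bool := PySem.Chars.isdigit a && (b == '(')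
def bBoundary2 (a b : Char) : Bool := (a == ')') && PySem.Chars.isdigit b

def insert_multiplication_operators_alt (expression : String) : String :=
  String.ofList (insertBetween bBoundary2 (insertBetween bBoundary1 expression.toList))

-- ===== PRECONDITION & SPEC =====
def Spec_insert_multiplication_operators (expression : String) (out : String) : Prop := out = insert_multiplication_operators_alt expression
instance (expression : String) (out : String) : Decidable (Spec_insert_multiplication_operators expression out) := by unfold Spec_insert_multiplication_operators; infer_instance

-- ===== CLAIM (what is proved, stated in full; the proofs are below) =====
def Claim_equal_insert_multiplication_operators : Prop := ∀ (expression : String), Dom_insert_multiplication_operators expression → Spec_insert_multiplication_operators expression (insert_multiplication_operators expression)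

-- ===== LEMMAS AND PROOFS =====

-- reference recursion threading "previous char is a digit"
def nextDigit : List Char → Bool
  | [] => false
  | x :: _ => PySem.Chars.isdigit x

def aGo (pd : Bool) : List Char → List Char
  | [] => []
  | c :: t =>
    (if c = '(' ∧ pd = true then ['*', c]
     else if c = ')' ∧ nextDigit t = true then [c, '*']
     else [c]) ++ aGo (PySem.Chars.isdigit c) t

def pdAt (cs : List Char) (i : Nat) : Bool :=
  if i = 0 then false else PySem.Chars.isdigit (cs.getD (i - 1) ' ')

theorem foldl_stepA_eq_aGo (cs : List Char) :
    ∀ (t : List Char) (i : Nat) (acc : List Char), cs.drop i = t →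
      (PySem.List.enumerate t (i : Int)).foldl (stepA cs) acc = acc ++ aGo (pdAt cs i) t := by
  intro t
  induction t with
  | nil => intro i acc _; simp [PySem.List.enumerate, aGo]
  | cons c t' ih =>
    intro i acc hdrop
    have hi : i < cs.length := by
      by_contra h
      simp [List.drop_eq_nil_of_le (Nat.le_of_not_lt h)] at hdrop
    have hget : cs[i]? = some c := by
      rw [← List.head?_drop, hdrop]; rfl
    have hdrop' : cs.drop (i + 1) = t' := by
      have := congrArg (List.drop 1) hdrop
      simpa [List.drop_drop, Nat.add_comm] using this
    rw [PySem.List.enumerate_cons]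
    rw [List.foldl_cons]
    have hcast : (i : Int) + 1 = ((i + 1 : Nat) : Int) := by push_cast; ring
    rw [hcast, ih (i + 1) _ hdrop']
    have hc1 : ((i : Int) > 0 ∧ PySem.Chars.isdigit (PySem.List.pyGetD cs ((i : Int) - 1) ' ') = true)
        ↔ (pdAt cs i = true) := by
      unfold pdAt
      rcases Nat.eq_zero_or_pos i with h0 | h0
      · subst h0; simp
      · have hne : i ≠ 0 := by omega
        have : ((i : Int) - 1) = ((i - 1 : Nat) : Int) := by omega
        rw [this, PySem.List.pyGetD_natCast]
        simp [hne, List.getD]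
        omega
    have hc2 : ((i : Int) < (cs.length : Int) - 1 ∧
          PySem.Chars.isdigit (PySem.List.pyGetD cs ((i : Int) + 1) ' ') = true)
        ↔ (nextDigit t' = true) := by
      cases ht' : t' with
      | nil =>
        have : i + 1 = cs.length := by
          have := congrArg List.length hdrop'
          simp [ht'] at this
          omega
        simp [nextDigit]
        omega
      | cons x xs =>
        have hx : cs[i+1]? = some x := by
          rw [← List.head?_drop, hdrop', ht']; rfl
        obtain ⟨hlen, hxv⟩ := List.getElem?_eq_some_iff.mp hx
        have : ((i : Int) + 1) = ((i + 1 : Nat) : Int) := by push_cast; ring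
        rw [this, PySem.List.pyGetD_natCast]
        have : cs.getD (i + 1) ' ' = x := by
          simp [List.getD, hx]
        rw [this]
        simp [nextDigit]
        omega
    have hstep : stepA cs acc ((i : Int), c) =
        acc ++ (if c = '(' ∧ pdAt cs i = true then ['*', c]
                else if c = ')' ∧ nextDigit t' = true then [c, '*']
                else [c]) := by
      unfold stepA
      by_cases h1 : (c = '(' ∧ pdAt cs i = true)
      · rw [if_pos ⟨h1.1, hc1.mpr h1.2⟩, if_pos h1]
      · have h1' : ¬ (c = '(' ∧ (i : Int) > 0 ∧
            PySem.Chars.isdigit (PySem.List.pyGetD cs ((i : Int) - 1) ' ') = true) := by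
          intro ⟨ha, hb⟩; exact h1 ⟨ha, hc1.mp hb⟩
        by_cases h2 : (c = ')' ∧ nextDigit t' = true)
        · rw [if_neg h1', if_pos ⟨h2.1, hc2.mpr h2.2⟩, if_neg h1, if_pos h2]
        · have h2' : ¬ (c = ')' ∧ (i : Int) < (cs.length : Int) - 1 ∧
              PySem.Chars.isdigit (PySem.List.pyGetD cs ((i : Int) + 1) ' ') = true) := by
            intro ⟨ha, hb⟩; exact h2 ⟨ha, hc2.mp hb⟩
          rw [if_neg h1', if_neg h2', if_neg h1, if_neg h2]
    rw [hstep]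
    have hpd : pdAt cs (i + 1) = PySem.Chars.isdigit c := by
      unfold pdAt
      simp [List.getD, hget]
    rw [hpd]
    conv_rhs => rw [aGo]
    simp [List.append_assoc]

theorem insertBetween_cons (p : Char → Char → Bool) (b : Char) (rest : List Char) :
    ∃ t, insertBetween p (b :: rest) = b :: t := by
  cases rest with
  | nil => exact ⟨[], rfl⟩
  | cons x xs =>
    unfold insertBetween
    by_cases h : p b x <;> simp [h]

theorem aGo_true_paren (t : List Char) :
    aGo true ('(' :: t) = '*' :: aGo false ('(' :: t) := by
  conv_lhs => rw [aGo]
  conv_rhs => rw [aGo]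
  simp [nextDigit, PySem.Chars.isdigit]

theorem passes_eq_aGo :
    ∀ (cs : List Char) (pd : Bool), (pd = true → cs.head? ≠ some '(') →
      insertBetween bBoundary2 (insertBetween bBoundary1 cs) = aGo pd cs := by
  intro cs
  induction cs with
  | nil => intro pd _; simp [insertBetween, aGo]
  | cons a tl ih =>
    intro pd hside
    have hpa : pd = true → a ≠ '(' := by
      intro h hc; exact hside h (by simp [hc])
    cases tl with
    | nil =>
      rw [aGo]
      by_cases hpd : pd = true
      · simp [insertBetween, nextDigit, hpa hpd, aGo]
      · simp at hpd
        simp [insertBetween, nextDigit, hpd, aGo]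
    | cons b rest =>
      by_cases hS : bBoundary1 a b = true
      · -- a is a digit and b = '(' : first pass inserts '*'
        have hda : PySem.Chars.isdigit a = true := by
          simp [bBoundary1] at hS; exact hS.1
        have hb : b = '(' := by
          simp [bBoundary1] at hS; exact hS.2
        have hane : a ≠ '(' ∧ a ≠ ')' := by
          constructor <;> (intro h; subst h; simp [PySem.Chars.isdigit] at hda)
        obtain ⟨t, ht⟩ := insertBetween_cons bBoundary1 b rest
        have h1 : insertBetween bBoundary1 (a :: b :: rest) = a :: '*' :: b :: t := by
          unfold insertBetween; rw [if_pos hS, ht]; rfl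
        rw [h1]
        have h2 : insertBetween bBoundary2 (a :: '*' :: b :: t) =
            a :: '*' :: insertBetween bBoundary2 (b :: t) := by
          have ha2 : bBoundary2 a '*' = false := by
            simp [bBoundary2, PySem.Chars.isdigit]
          have hs2 : bBoundary2 '*' b = false := by simp [bBoundary2]
          simp [insertBetween, ha2, hs2]
        subst hb
        rw [h2, ← ht, ih false (by simp)]
        conv_rhs => rw [aGo]
        have hc1 : ¬ (a = '(' ∧ pd = true) := fun h => hane.1 h.1
        have hc2 : ¬ (a = ')' ∧ nextDigit ('(' :: rest) = true) := by
          simp [nextDigit, PySem.Chars.isdigit]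
        rw [if_neg hc1, if_neg hc2, hda, aGo_true_paren]
        simp
      · -- no digit-'(' boundary at (a, b)
        obtain ⟨t, ht⟩ := insertBetween_cons bBoundary1 b rest
        have h1 : insertBetween bBoundary1 (a :: b :: rest) = a :: b :: t := by
          unfold insertBetween; rw [if_neg (by simp [hS]), ht]; rfl
        rw [h1]
        have hside' : PySem.Chars.isdigit a = true → (b :: rest).head? ≠ some '(' := by
          intro hda hc
          simp at hc
          exact hS (by simp [bBoundary1, hda, hc])
        have hrec : insertBetween bBoundary2 (b :: t) = aGo (PySem.Chars.isdigit a) (b :: rest) := by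
          rw [← ht]; exact ih _ hside'
        rw [aGo]
        by_cases h2 : bBoundary2 a b = true
        · have ha : a = ')' := by simp [bBoundary2] at h2; exact h2.1
          have hdb : nextDigit (b :: rest) = true := by
            simp [bBoundary2] at h2; simp [nextDigit, h2.2]
          have hane : a ≠ '(' := by subst ha; decide
          have hstep : insertBetween bBoundary2 (a :: b :: t) =
              a :: '*' :: insertBetween bBoundary2 (b :: t) := by
            simp [insertBetween, h2]
          rw [hstep, hrec]
          simp [ha, hdb]
        · have hstep : insertBetween bBoundary2 (a :: b :: t) =
              a :: insertBetween bBoundary2 (b :: t) := by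
            simp [insertBetween, h2]
          rw [hstep, hrec]
          by_cases hpd : pd = true
          · have hnd : ¬ (a = ')' ∧ nextDigit (b :: rest) = true) := by
              intro ⟨ha, hb'⟩
              simp [nextDigit] at hb'
              exact h2 (by simp [bBoundary2, ha, hb'])
            simp [hpa hpd, hnd]
          · simp at hpd
            have hnd : ¬ (a = ')' ∧ nextDigit (b :: rest) = true) := by
              intro ⟨ha, hb'⟩
              simp [nextDigit] at hb'
              exact h2 (by simp [bBoundary2, ha, hb'])
            simp [hpd, hnd]

-- ===== VERDICT (by name: the statement is the Claim_ definition above) =====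
theorem insert_multiplication_operators_spec : Claim_equal_insert_multiplication_operators := by
  intro expression _
  unfold Spec_insert_multiplication_operators insert_multiplication_operators
    insert_multiplication_operators_alt
  show String.ofList ((PySem.List.enumerate expression.toList 0).foldl (stepA expression.toList) []) =
    String.ofList (insertBetween bBoundary2 (insertBetween bBoundary1 expression.toList))
  have h1 := foldl_stepA_eq_aGo expression.toList expression.toList 0 [] (by simp)
  simp only [Nat.cast_zero] at h1
  rw [h1]
  rw [passes_eq_aGo expression.toList false (by simp)]
  simp [pdAt]
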